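-- pv_equiv track=rewrite | github.com/NeutrinoRicky/Monst3R_Init | reflow_a1/run_fine_debug.py | _split_into_overlapping_clips
-- ===== SOURCE A (Python) =====
-- from typing import Any, Dict, List, Sequence, Tuple
--
-- def _split_into_overlapping_clips(
--     frame_ids: Sequence[str],
--     clip_len: int,
--     overlap_frames: int,
-- ) -> List[List[str]]:
--     if clip_len <= 0:
--         raise ValueError(f"clip_len must be positive, got {clip_len}")
--     overlap_frames = max(int(overlap_frames), 0)
--     if overlap_frames <= 0:
--         return [list(frame_ids[i : i + clip_len]) for i in range(0, len(frame_ids), clip_len)]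
--     if overlap_frames >= clip_len:
--         raise ValueError(
--             f"overlap_frames must be smaller than clip_len; got overlap_frames={overlap_frames}, clip_len={clip_len}"
--         )
--
--     stride = clip_len - overlap_frames
--     clips: List[List[str]] = []
--     start = 0
--     frame_ids = list(frame_ids)
--     while start < len(frame_ids):
--         clips.append(list(frame_ids[start : start + clip_len]))
--         if start + clip_len >= len(frame_ids):
--             break
--         start += stride
--     return clips
-- ===== SOURCE B (Python) =====
-- from typing import List, Sequence
--
--
-- def _split_into_overlapping_clips(
--     frame_ids: Sequence[str],
--     clip_len: int,
--     overlap_frames: int,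
-- ) -> List[List[str]]:
--     if clip_len <= 0:
--         raise ValueError(f"clip_len must be positive, got {clip_len}")
--     overlap_frames = max(int(overlap_frames), 0)
--     if overlap_frames <= 0:
--         return [list(frame_ids[i : i + clip_len]) for i in range(0, len(frame_ids), clip_len)]
--     if overlap_frames >= clip_len:
--         raise ValueError(
--             f"overlap_frames must be smaller than clip_len; got overlap_frames={overlap_frames}, clip_len={clip_len}"
--         )
--
--     frame_ids = list(frame_ids)
--     if not frame_ids:
--         return []
--     stride = clip_len - overlap_frames
--     n = 1 + (max(len(frame_ids) - clip_len, 0) + stride - 1) // stride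
--     return [list(frame_ids[i * stride : i * stride + clip_len]) for i in range(n)]
-- ===== Notes on version B (the rewrite author's own statement) =====
-- stated objective: alternative
-- what changed: The while-loop-with-break accumulation of overlapping clips is replaced by a closed-form clip count (1 + ceil(max(len-clip_len,0)/stride)) and a single slicing comprehension over range(n); the guards and the non-overlapping branch are unchanged.
import Mathlib
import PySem

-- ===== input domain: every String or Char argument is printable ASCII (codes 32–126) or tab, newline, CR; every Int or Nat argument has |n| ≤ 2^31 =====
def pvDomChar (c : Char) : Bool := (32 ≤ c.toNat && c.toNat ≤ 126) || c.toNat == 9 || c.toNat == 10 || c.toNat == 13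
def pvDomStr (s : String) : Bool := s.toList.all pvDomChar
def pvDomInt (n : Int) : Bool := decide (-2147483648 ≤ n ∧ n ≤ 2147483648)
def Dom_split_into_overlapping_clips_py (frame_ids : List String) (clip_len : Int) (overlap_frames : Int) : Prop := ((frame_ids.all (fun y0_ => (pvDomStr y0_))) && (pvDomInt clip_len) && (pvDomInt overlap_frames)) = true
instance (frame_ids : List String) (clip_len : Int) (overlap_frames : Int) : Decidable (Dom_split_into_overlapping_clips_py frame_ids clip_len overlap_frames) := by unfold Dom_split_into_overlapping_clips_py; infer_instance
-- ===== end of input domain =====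

-- B replaces A's while-loop accumulation of overlapping clips by a closed-form clip count
-- plus one slicing comprehension (alternative decomposition, same cost); guards and the
-- non-overlapping branch are unchanged.

-- ===== PORT A =====
-- the while loop of A: fuel-bounded recursion (fuel only makes the recursion total;
-- inside A's reachable branch stride ≥ 1, so frame_ids.length + 1 steps always suffice)
def pvClipsLoopA (frame_ids : List String) (clip_len stride : Int) :
    Nat → Int → List (List String) → List (List String)
  | 0, _, clips => clips
  | fuel + 1, start, clips =>
    if start < (frame_ids.length : Int) then
      let clips' := clips ++ [PySem.List.slice frame_ids (some start) (some (start + clip_len))]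
      if start + clip_len ≥ (frame_ids.length : Int) then clips'
      else pvClipsLoopA frame_ids clip_len stride fuel (start + stride) clips'
    else clips

def split_into_overlapping_clips_py (frame_ids : List String) (clip_len : Int) (overlap_frames : Int) : List (List String) :=
  if clip_len ≤ 0 then []  -- Python: raise ValueError (excluded by Pre_)
  else
    let ov := max overlap_frames 0
    if ov ≤ 0 then
      (PySem.List.pyRange 0 (PySem.List.len frame_ids) clip_len).map
        (fun i => PySem.List.slice frame_ids (some i) (some (i + clip_len)))
    else if ov ≥ clip_len then []  -- Python: raise ValueError (excluded by Pre_)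
    else
      pvClipsLoopA frame_ids clip_len (clip_len - ov) (frame_ids.length + 1) 0 []

-- ===== PORT B =====
def split_into_overlapping_clips_py_alt (frame_ids : List String) (clip_len : Int) (overlap_frames : Int) : List (List String) :=
  if clip_len ≤ 0 then []  -- Python: raise ValueError (excluded by Pre_)
  else
    let ov := max overlap_frames 0
    if ov ≤ 0 then
      (PySem.List.pyRange 0 (PySem.List.len frame_ids) clip_len).map
        (fun i => PySem.List.slice frame_ids (some i) (some (i + clip_len)))
    else if ov ≥ clip_len then []  -- Python: raise ValueError (excluded by Pre_)
    else if frame_ids = [] then []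
    else
      let stride := clip_len - ov
      let n := 1 + PySem.Int.floordiv (max (PySem.List.len frame_ids - clip_len) 0 + stride - 1) stride
      (PySem.List.pyRange 0 n 1).map
        (fun i => PySem.List.slice frame_ids (some (i * stride)) (some (i * stride + clip_len)))

-- ===== PRECONDITION & SPEC =====
-- Pre_ excludes exactly the inputs on which A raises ValueError: clip_len ≤ 0, or a
-- positive overlap_frames ≥ clip_len (for overlap_frames ≤ 0 A returns before that check).
def Pre_split_into_overlapping_clips_py (frame_ids : List String) (clip_len : Int) (overlap_frames : Int) : Prop :=
  0 < clip_len ∧ overlap_frames < clip_len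

instance (frame_ids : List String) (clip_len : Int) (overlap_frames : Int) : Decidable (Pre_split_into_overlapping_clips_py frame_ids clip_len overlap_frames) := by unfold Pre_split_into_overlapping_clips_py; infer_instance

def pvWitness_split_into_overlapping_clips_py : List String × Int × Int := (["a", "b", "c", "d", "e"], 3, 1)

def Spec_split_into_overlapping_clips_py (frame_ids : List String) (clip_len : Int) (overlap_frames : Int) (out : List (List String)) : Prop := out = split_into_overlapping_clips_py_alt frame_ids clip_len overlap_frames
instance (frame_ids : List String) (clip_len : Int) (overlap_frames : Int) (out : List (List String)) : Decidable (Spec_split_into_overlapping_clips_py frame_ids clip_len overlap_frames out) := by unfold Spec_split_into_overlapping_clips_py; infer_instance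

-- ===== CLAIM (what is proved, stated in full; the proofs are below) =====
def Claim_equal_split_into_overlapping_clips_py : Prop := ∀ (frame_ids : List String) (clip_len : Int) (overlap_frames : Int), Dom_split_into_overlapping_clips_py frame_ids clip_len overlap_frames → Pre_split_into_overlapping_clips_py frame_ids clip_len overlap_frames → Spec_split_into_overlapping_clips_py frame_ids clip_len overlap_frames (split_into_overlapping_clips_py frame_ids clip_len overlap_frames)

-- ===== LEMMAS AND PROOFS =====

-- B's ceiling count, as a function of the "gap" x = len - clip_len - start
def pvCnt (x s : Int) : Int := 1 + PySem.Int.floordiv (max x 0 + s - 1) s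

lemma pvCnt_base (x s : Int) (hs : 1 ≤ s) (hx : x ≤ 0) : pvCnt x s = 1 := by
  have hmax : max x 0 = 0 := by omega
  unfold pvCnt
  rw [hmax]
  have h0 : PySem.Int.floordiv (0 + s - 1) s = 0 := by
    rw [PySem.Int.floordiv_eq_iff_of_pos (by omega)]
    constructor <;> nlinarith
  rw [h0]
  norm_num

lemma pvCnt_nonneg (x s : Int) (hs : 1 ≤ s) : 0 ≤ pvCnt x s := by
  have h := (PySem.Int.floordiv_eq_iff_of_pos (a := max x 0 + s - 1) (b := s)
    (q := PySem.Int.floordiv (max x 0 + s - 1) s) (by omega)).mp rfl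
  unfold pvCnt
  nlinarith [h.1, h.2, le_max_right x 0]

lemma pvCnt_step (x s : Int) (hs : 1 ≤ s) (hx : 0 < x) : pvCnt x s = pvCnt (x - s) s + 1 := by
  unfold pvCnt
  have hq := (PySem.Int.floordiv_eq_iff_of_pos (a := max (x - s) 0 + s - 1) (b := s)
    (q := PySem.Int.floordiv (max (x - s) 0 + s - 1) s) (by omega)).mp rfl
  set q := PySem.Int.floordiv (max (x - s) 0 + s - 1) s with hqdef
  have hmaxx : max x 0 = x := by omega
  have hgoal : PySem.Int.floordiv (max x 0 + s - 1) s = q + 1 := by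
    rw [hmaxx, PySem.Int.floordiv_eq_iff_of_pos (by omega)]
    by_cases hcase : x ≤ s
    · have hmax2 : max (x - s) 0 = 0 := by omega
      rw [hmax2] at hq
      have : q = 0 := by nlinarith [hq.1, hq.2]
      constructor <;> nlinarith
    · have hmax2 : max (x - s) 0 = x - s := by omega
      rw [hmax2] at hq
      constructor <;> nlinarith [hq.1, hq.2]
  rw [hgoal]
  ring

-- the loop, for 1 ≤ stride < clip_len, produces exactly pvCnt-many strided slices
lemma pvClipsLoopA_eq (frame_ids : List String) (c s : Int) (hs : 1 ≤ s) (hsc : s < c) :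
    ∀ (fuel : Nat) (start : Int) (acc : List (List String)),
      0 ≤ start → start < (frame_ids.length : Int) →
      (frame_ids.length : Int) - start ≤ s * fuel →
      pvClipsLoopA frame_ids c s fuel start acc =
        acc ++ (List.range (pvCnt ((frame_ids.length : Int) - c - start) s).toNat).map
          (fun k : Nat => PySem.List.slice frame_ids (some (start + (k : Int) * s))
            (some (start + (k : Int) * s + c))) := by
  intro fuel
  induction fuel with
  | zero => intro start acc h0 h1 h2; exfalso; simp at h2; omega
  | succ fuel ih =>
    intro start acc h0 h1 h2
    rw [pvClipsLoopA]
    rw [if_pos h1]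
    by_cases hend : start + c ≥ (frame_ids.length : Int)
    · rw [if_pos hend]
      have hcnt : pvCnt ((frame_ids.length : Int) - c - start) s = 1 := pvCnt_base _ _ hs (by omega)
      rw [hcnt]
      simp
    · rw [if_neg hend]
      rw [not_le] at hend
      have hrec := ih (start + s) (acc ++ [PySem.List.slice frame_ids (some start) (some (start + c))])
        (by omega) (by omega) (by push_cast at h2 ⊢; nlinarith)
      rw [hrec]
      have hcnt : pvCnt ((frame_ids.length : Int) - c - start) s
          = pvCnt ((frame_ids.length : Int) - c - (start + s)) s + 1 := by
        have h := pvCnt_step ((frame_ids.length : Int) - c - start) s hs (by omega)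
        have harg : (frame_ids.length : Int) - c - start - s
            = (frame_ids.length : Int) - c - (start + s) := by ring
        rw [h, harg]
      have hpos : 0 ≤ pvCnt ((frame_ids.length : Int) - c - (start + s)) s := pvCnt_nonneg _ _ hs
      rw [hcnt]
      have htn : (pvCnt ((frame_ids.length : Int) - c - (start + s)) s + 1).toNat
          = (pvCnt ((frame_ids.length : Int) - c - (start + s)) s).toNat + 1 := by omega
      rw [htn, List.range_succ_eq_map, List.map_cons, List.map_map, List.append_assoc,
        List.singleton_append]
      congr 1
      congr 1
      · norm_num
      · apply List.map_congr_left
        intro k _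
        simp only [Function.comp_apply]
        have hk : start + ((k.succ : Nat) : Int) * s = start + s + (k : Int) * s := by
          push_cast; ring
        rw [hk]

-- ===== VERDICT (by name: the statement is the Claim_ definition above) =====
theorem split_into_overlapping_clips_py_spec : Claim_equal_split_into_overlapping_clips_py := by
  intro frame_ids clip_len overlap_frames _ hpre
  obtain ⟨hcl, hov⟩ := hpre
  unfold Spec_split_into_overlapping_clips_py
  have hA : ¬ clip_len ≤ 0 := by omega
  simp only [split_into_overlapping_clips_py, split_into_overlapping_clips_py_alt, if_neg hA]
  by_cases hle : max overlap_frames 0 ≤ 0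
  · simp only [if_pos hle]
  · have hge : ¬ max overlap_frames 0 ≥ clip_len := by omega
    simp only [if_neg hle, if_neg hge]
    by_cases hnil : frame_ids = []
    · subst hnil
      simp [pvClipsLoopA]
    · simp only [if_neg hnil]
      have hlen : 0 < frame_ids.length := List.length_pos_iff.mpr hnil
      have hs : 1 ≤ clip_len - max overlap_frames 0 := by omega
      have hsc : clip_len - max overlap_frames 0 < clip_len := by omega
      rw [pvClipsLoopA_eq frame_ids clip_len (clip_len - max overlap_frames 0) hs hsc
        (frame_ids.length + 1) 0 [] le_rfl (by exact_mod_cast hlen)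
        (by push_cast; nlinarith)]
      simp only [List.nil_append, PySem.List.len_eq, sub_zero]
      rw [PySem.List.pyRange_one, List.map_map]
      congr 1
      · funext k
        simp only [Function.comp_apply, zero_add]
      · congr 1
        unfold pvCnt
        omega
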